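-- pv_equiv track=rewrite | github.com/KaramAlrasam/implementationsFunction | isSubListExist.py | isSubListExist2
-- ===== SOURCE A (Python) =====
-- def isSubListExist2(main_l, sub_l)->bool:
--   """It checks if the sub_list is existent in the main_list"""
--   #first you ned to know the length of the list
--   if len(sub_l)>len(main_l) or len(sub_l)<=0:
--     raise ValueError (f"{sub_l} must be its length lesser than main list")
--   else:
--     for i in range(0,len(main_l)):
--       if sub_l == main_l[i:len(sub_l)+i]:
--         return True
--     return False
-- ===== SOURCE B (Python) =====
-- def isSubListExist2(main_l, sub_l) -> bool:
--     """Rabin-Karp: roll a modular polynomial hash of each window across main_l and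
--     compare the full window only when its hash equals sub_l's hash."""
--     m = len(sub_l)
--     n = len(main_l)
--     if m == 0:
--         return True
--     if m > n:
--         return False
--     BASE = 1000003
--     MOD = (1 << 61) - 1
--     target = 0
--     for x in sub_l:
--         target = (target * BASE + x) % MOD
--     h = 0
--     for x in main_l[:m]:
--         h = (h * BASE + x) % MOD
--     power = pow(BASE, m - 1, MOD)
--     for i in range(n - m + 1):
--         if h == target and main_l[i:i + m] == sub_l:
--             return True
--         if i + m < n:
--             h = ((h - main_l[i] * power) * BASE + main_l[i + m]) % MOD
--     return False
-- ===== Notes on version B (the rewrite author's own statement) =====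
-- stated objective: faster
-- what changed: Replaces A's slice-and-compare at every start position by Rabin-Karp: a rolling modular polynomial hash is updated in O(1) per position and the full window is compared only when its hash equals sub_l's hash (exact, since the compare confirms every hash hit).
import Mathlib
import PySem

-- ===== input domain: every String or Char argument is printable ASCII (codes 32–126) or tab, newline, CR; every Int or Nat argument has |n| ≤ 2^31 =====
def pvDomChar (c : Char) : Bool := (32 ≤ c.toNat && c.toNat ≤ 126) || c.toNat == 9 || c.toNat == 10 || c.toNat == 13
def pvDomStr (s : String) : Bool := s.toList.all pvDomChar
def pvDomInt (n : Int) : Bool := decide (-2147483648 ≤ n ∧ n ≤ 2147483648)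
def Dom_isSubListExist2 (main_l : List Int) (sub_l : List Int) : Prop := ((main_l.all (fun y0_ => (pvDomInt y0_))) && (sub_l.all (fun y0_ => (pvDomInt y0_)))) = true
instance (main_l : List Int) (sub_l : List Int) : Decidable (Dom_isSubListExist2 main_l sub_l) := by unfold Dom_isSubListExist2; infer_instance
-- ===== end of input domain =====

-- B replaces A's slice-compare at every start position by Rabin–Karp: a rolling
-- polynomial hash, with the full window compared only on a hash hit; return values
-- are proved equal on Pre_ (where A does not raise).

-- ===== PORT A =====
-- for i in range(0, len(main_l)): if sub_l == main_l[i:len(sub_l)+i]: return True / return False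
def pvALoop (main_l sub_l : List Int) : List Int → Bool
  | [] => false
  | i :: rest =>
    if sub_l == PySem.List.slice main_l (some i) (some ((sub_l.length : Int) + i)) then true
    else pvALoop main_l sub_l rest

def isSubListExist2 (main_l : List Int) (sub_l : List Int) : Bool :=
  -- the raise branch returns false here; Pre_ excludes those inputs
  if sub_l.length > main_l.length || sub_l.length ≤ 0 then false
  else pvALoop main_l sub_l (PySem.List.pyRange 0 (main_l.length : Int) 1)

-- ===== PORT B =====
def pvM : Int := 2305843009213693951  -- MOD = (1 << 61) - 1

-- target/h accumulation loops of Source B ('% MOD' at every step, as in Source B)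
def pvHashM (l : List Int) : Int :=
  l.foldl (fun acc x => PySem.Int.mod (acc * 1000003 + x) pvM) 0

-- the main loop of Source B: fuel = number of remaining iterations, i = current index
-- (indices are Nat here since the loop starts at 0; .getD i 0 is exact for in-range i)
def pvRK (main_l sub_l : List Int) (power : Int) (target : Int) : Nat → Nat → Int → Bool
  | _, 0, _ => false
  | i, fuel + 1, h =>
    if h == target && ((main_l.drop i).take sub_l.length == sub_l) then true
    else
      let h' := if i + sub_l.length < main_l.length
        then PySem.Int.mod
          ((h - main_l.getD i 0 * power) * 1000003 + main_l.getD (i + sub_l.length) 0) pvM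
        else h
      pvRK main_l sub_l power target (i + 1) fuel h'

def isSubListExist2_alt (main_l : List Int) (sub_l : List Int) : Bool :=
  if sub_l.length == 0 then true
  else if sub_l.length > main_l.length then false
  else
    let target := pvHashM sub_l
    let h0 := pvHashM (main_l.take sub_l.length)
    -- pow(BASE, m-1, MOD) of Source B
    let power := PySem.Int.mod ((1000003 : Int) ^ (sub_l.length - 1)) pvM
    pvRK main_l sub_l power target 0 (main_l.length - sub_l.length + 1) h0

-- ===== PRECONDITION & SPEC =====
-- exactly the inputs on which A returns (A raises ValueError otherwise)
def Pre_isSubListExist2 (main_l : List Int) (sub_l : List Int) : Prop :=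
  0 < sub_l.length ∧ sub_l.length ≤ main_l.length
instance (main_l : List Int) (sub_l : List Int) : Decidable (Pre_isSubListExist2 main_l sub_l) := by
  unfold Pre_isSubListExist2; infer_instance

def pvWitness_isSubListExist2 : List Int × List Int := ([1, 2, 3], [2, 3])

def Spec_isSubListExist2 (main_l : List Int) (sub_l : List Int) (out : Bool) : Prop := out = isSubListExist2_alt main_l sub_l
instance (main_l : List Int) (sub_l : List Int) (out : Bool) : Decidable (Spec_isSubListExist2 main_l sub_l out) := by unfold Spec_isSubListExist2; infer_instance

-- ===== CLAIM (what is proved, stated in full; the proofs are below) =====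
def Claim_equal_isSubListExist2 : Prop := ∀ (main_l : List Int) (sub_l : List Int), Dom_isSubListExist2 main_l sub_l → Pre_isSubListExist2 main_l sub_l → Spec_isSubListExist2 main_l sub_l (isSubListExist2 main_l sub_l)

-- ===== LEMMAS AND PROOFS =====

-- both programs are reduced to: some window of main_l equals sub_l
def pvWin (main_l sub_l : List Int) (k : Nat) : List Int := (main_l.drop k).take sub_l.length

-- the UNreduced polynomial hash, a proof device relating the modular hashes
def pvHash (l : List Int) : Int := l.foldl (fun acc x => acc * 1000003 + x) 0

theorem pvM_pos : (0 : Int) < pvM := by norm_num [pvM]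

theorem pvHashM_foldl (l : List Int) :
    ∀ a b : Int, a = b % pvM →
      l.foldl (fun acc x => PySem.Int.mod (acc * 1000003 + x) pvM) a
        = (l.foldl (fun acc x => acc * 1000003 + x) b) % pvM := by
  induction l with
  | nil => intro a b h; simpa using h
  | cons x t ih =>
    intro a b h
    simp only [List.foldl_cons]
    apply ih
    rw [PySem.Int.mod_eq_emod_of_pos pvM_pos]
    have : a * 1000003 + x ≡ b * 1000003 + x [ZMOD pvM] := by
      apply Int.ModEq.add_right
      apply Int.ModEq.mul_right
      rw [h]
      exact (Int.emod_emod_of_dvd b dvd_rfl)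
    exact this

theorem pvHashM_eq (l : List Int) : pvHashM l = pvHash l % pvM :=
  pvHashM_foldl l 0 0 (by norm_num)

theorem pvALoop_any (main_l sub_l : List Int) (l : List Int) :
    pvALoop main_l sub_l l =
      l.any (fun i => sub_l == PySem.List.slice main_l (some i) (some ((sub_l.length : Int) + i))) := by
  induction l with
  | nil => rfl
  | cons i rest ih =>
    simp only [pvALoop, List.any_cons]
    split_ifs with h
    · simp [h]
    · simp [h, ih]

theorem pvA_iff (main_l sub_l : List Int)
    (hpre : Pre_isSubListExist2 main_l sub_l) :
    isSubListExist2 main_l sub_l = true ↔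
      ∃ k : Nat, k + sub_l.length ≤ main_l.length ∧ pvWin main_l sub_l k = sub_l := by
  obtain ⟨h1, h2⟩ := hpre
  unfold isSubListExist2
  have hg : (sub_l.length > main_l.length || sub_l.length ≤ 0) = false := by
    simp
    exact ⟨h2, List.ne_nil_of_length_pos h1⟩
  rw [hg]
  simp only [Bool.false_eq_true, if_false, pvALoop_any, List.any_eq_true]
  constructor
  · rintro ⟨i, hi, hslice⟩
    rw [PySem.List.mem_pyRange_one] at hi
    obtain ⟨hi0, him⟩ := hi
    obtain ⟨k, rfl⟩ : ∃ k : Nat, i = (k : Int) := ⟨i.toNat, by omega⟩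
    rw [beq_iff_eq] at hslice
    have hc : ((sub_l.length : Int) + (k : Int)) = ((sub_l.length + k : Nat) : Int) := by push_cast; ring
    rw [hc, PySem.List.slice_natCast] at hslice
    have ht : sub_l.length + k - k = sub_l.length := by omega
    rw [ht] at hslice
    have hkle : k + sub_l.length ≤ main_l.length := by
      have := congrArg List.length hslice
      simp at this
      omega
    exact ⟨k, hkle, hslice.symm⟩
  · rintro ⟨k, hk, hm⟩
    refine ⟨(k : Int), ?_, ?_⟩
    · rw [PySem.List.mem_pyRange_one]
      omega
    · rw [beq_iff_eq]
      have hc : ((sub_l.length : Int) + (k : Int)) = ((sub_l.length + k : Nat) : Int) := by push_cast; ring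
      rw [hc, PySem.List.slice_natCast]
      have ht : sub_l.length + k - k = sub_l.length := by omega
      rw [ht]
      exact hm.symm

-- hash of a foldl with a non-zero accumulator
theorem pvHash_foldl (acc : Int) (l : List Int) :
    l.foldl (fun a x => a * 1000003 + x) acc
      = acc * 1000003 ^ l.length + pvHash l := by
  induction l generalizing acc with
  | nil => simp [pvHash]
  | cons x t ih =>
    simp only [List.foldl_cons, List.length_cons, pvHash]
    rw [ih (acc * 1000003 + x), ih (0 * 1000003 + x)]
    ring

theorem pvHash_cons (x : Int) (l : List Int) :
    pvHash (x :: l) = x * 1000003 ^ l.length + pvHash l := by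
  unfold pvHash
  simp only [List.foldl_cons]
  rw [show (0 : Int) * 1000003 + x = x by ring, pvHash_foldl x l]
  rfl

theorem pvHash_append_singleton (l : List Int) (x : Int) :
    pvHash (l ++ [x]) = pvHash l * 1000003 + x := by
  unfold pvHash
  rw [List.foldl_append]
  simp

-- window decomposition: head and extension
theorem pvWin_cons (main_l sub_l : List Int) (k : Nat)
    (hm : 0 < sub_l.length) (hk : k + sub_l.length ≤ main_l.length) :
    pvWin main_l sub_l k
      = main_l.getD k 0 :: (main_l.drop (k + 1)).take (sub_l.length - 1) := by
  unfold pvWin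
  have hk' : k < main_l.length := by omega
  rw [List.getD_eq_getElem main_l 0 hk']
  obtain ⟨n, hs⟩ : ∃ n, sub_l.length = n + 1 := ⟨sub_l.length - 1, by omega⟩
  rw [hs]
  simp only [Nat.add_sub_cancel]
  rw [List.drop_eq_getElem_cons hk', List.take_succ_cons]

theorem pvWin_roll (main_l sub_l : List Int) (k : Nat)
    (hm : 0 < sub_l.length) (hk : k + sub_l.length < main_l.length) :
    pvWin main_l sub_l (k + 1)
      = (main_l.drop (k + 1)).take (sub_l.length - 1) ++ [main_l.getD (k + sub_l.length) 0] := by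
  unfold pvWin
  obtain ⟨n, hs⟩ : ∃ n, sub_l.length = n + 1 := ⟨sub_l.length - 1, by omega⟩
  rw [hs] at hk ⊢
  simp only [Nat.add_sub_cancel]
  have hkm : k + (n + 1) < main_l.length := hk
  rw [List.getD_eq_getElem main_l 0 hkm]
  rw [List.take_add_one]
  congr 1
  have hidx : n < (main_l.drop (k + 1)).length := by
    rw [List.length_drop]; omega
  rw [List.getElem?_eq_getElem hidx, List.getElem_drop]
  simp only [Option.toList]
  congr 2
  omega

-- rolling-hash update preserves the window-hash invariant
theorem pvHash_roll (main_l sub_l : List Int) (k : Nat)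
    (hm : 0 < sub_l.length) (hk : k + sub_l.length < main_l.length) :
    pvHash (pvWin main_l sub_l (k + 1))
      = (pvHash (pvWin main_l sub_l k) - main_l.getD k 0 * 1000003 ^ (sub_l.length - 1)) * 1000003
          + main_l.getD (k + sub_l.length) 0 := by
  rw [pvWin_cons main_l sub_l k hm (by omega), pvWin_roll main_l sub_l k hm hk,
    pvHash_append_singleton, pvHash_cons]
  have hlen : ((main_l.drop (k + 1)).take (sub_l.length - 1)).length = sub_l.length - 1 := by
    rw [List.length_take, List.length_drop]; omega
  rw [hlen]
  ring

-- the loop invariant: h is the modular hash of the current window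
theorem pvRK_iff (main_l sub_l : List Int) (hm : 0 < sub_l.length)
    (hmn : sub_l.length ≤ main_l.length) :
    ∀ (fuel i : Nat) (h : Int),
      i + fuel = main_l.length - sub_l.length + 1 →
      (0 < fuel → h = pvHash (pvWin main_l sub_l i) % pvM) →
      (pvRK main_l sub_l (PySem.Int.mod ((1000003 : Int) ^ (sub_l.length - 1)) pvM)
          (pvHashM sub_l) i fuel h = true ↔
        ∃ k : Nat, i ≤ k ∧ k + sub_l.length ≤ main_l.length ∧ pvWin main_l sub_l k = sub_l) := by
  intro fuel
  induction fuel with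
  | zero =>
    intro i h hif _
    simp only [pvRK]
    constructor
    · intro hc; cases hc
    · rintro ⟨k, hik, hkl, _⟩; omega
  | succ f ih =>
    intro i h hif hinv
    have hinv' := hinv (by omega)
    have hki : i + sub_l.length ≤ main_l.length := by omega
    simp only [pvRK]
    have hcond : (h == pvHashM sub_l && ((main_l.drop i).take sub_l.length == sub_l))
        = (pvWin main_l sub_l i == sub_l) := by
      by_cases hw : pvWin main_l sub_l i = sub_l
      · have : h = pvHashM sub_l := by rw [hinv', hw, pvHashM_eq]
        simp [pvWin] at hw ⊢
        simp [hw, this]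
      · simp [pvWin] at hw ⊢
        simp [hw]
    rw [hcond]
    by_cases hw : pvWin main_l sub_l i = sub_l
    · simp only [hw, beq_self_eq_true, if_true, true_iff]
      exact ⟨i, le_refl _, hki, hw⟩
    · have hbe : (pvWin main_l sub_l i == sub_l) = false := by simp [hw]
      rw [hbe]
      simp only [Bool.false_eq_true, if_false]
      rw [ih (i + 1) _ (by omega) ?_]
      · constructor
        · rintro ⟨k, hik, hkl, hwk⟩; exact ⟨k, by omega, hkl, hwk⟩
        · rintro ⟨k, hik, hkl, hwk⟩
          refine ⟨k, ?_, hkl, hwk⟩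
          rcases Nat.eq_or_lt_of_le hik with rfl | hlt
          · exact absurd hwk hw
          · omega
      · intro hf
        have hlt : i + sub_l.length < main_l.length := by omega
        rw [if_pos hlt, hinv']
        rw [PySem.Int.mod_eq_emod_of_pos pvM_pos]
        have hpow : PySem.Int.mod ((1000003 : Int) ^ (sub_l.length - 1)) pvM
            ≡ (1000003 : Int) ^ (sub_l.length - 1) [ZMOD pvM] := by
          rw [PySem.Int.mod_eq_emod_of_pos pvM_pos]
          exact Int.emod_emod_of_dvd _ dvd_rfl
        have hh : pvHash (pvWin main_l sub_l i) % pvM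
            ≡ pvHash (pvWin main_l sub_l i) [ZMOD pvM] :=
          Int.emod_emod_of_dvd _ dvd_rfl
        have hcongr :
            (pvHash (pvWin main_l sub_l i) % pvM
                - main_l.getD i 0 * PySem.Int.mod ((1000003 : Int) ^ (sub_l.length - 1)) pvM)
                  * 1000003 + main_l.getD (i + sub_l.length) 0
              ≡ (pvHash (pvWin main_l sub_l i)
                - main_l.getD i 0 * (1000003 : Int) ^ (sub_l.length - 1))
                  * 1000003 + main_l.getD (i + sub_l.length) 0 [ZMOD pvM] :=
          Int.ModEq.add_right _ (Int.ModEq.mul_right _ (Int.ModEq.sub hh (Int.ModEq.mul_left _ hpow)))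
        rw [hcongr, ← pvHash_roll main_l sub_l i hm hlt]

theorem pvB_iff (main_l sub_l : List Int)
    (hpre : Pre_isSubListExist2 main_l sub_l) :
    isSubListExist2_alt main_l sub_l = true ↔
      ∃ k : Nat, k + sub_l.length ≤ main_l.length ∧ pvWin main_l sub_l k = sub_l := by
  obtain ⟨h1, h2⟩ := hpre
  unfold isSubListExist2_alt
  have hg0 : (sub_l.length == 0) = false := beq_eq_false_iff_ne.mpr (by omega)
  rw [hg0]
  simp only [Bool.false_eq_true, if_false]
  rw [if_neg (by omega)]
  rw [pvRK_iff main_l sub_l h1 h2 (main_l.length - sub_l.length + 1) 0 _ (by omega)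
    (fun _ => by simp [pvWin, pvHashM_eq])]
  constructor
  · rintro ⟨k, _, hkl, hw⟩; exact ⟨k, hkl, hw⟩
  · rintro ⟨k, hkl, hw⟩; exact ⟨k, Nat.zero_le _, hkl, hw⟩

-- ===== VERDICT (by name: the statement is the Claim_ definition above) =====
theorem isSubListExist2_spec : Claim_equal_isSubListExist2 := by
  intro main_l sub_l _ hpre
  unfold Spec_isSubListExist2
  rw [Bool.eq_iff_iff, pvA_iff main_l sub_l hpre, pvB_iff main_l sub_l hpre]
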